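-- pv_equiv track=rewrite | github.com/ATPs/xiaolongTools | WenlinTools.Python3/scripts/fasta2chromopainterInput_fillGap.py | group_seqDict
-- ===== SOURCE A (Python) =====
-- def group_seqDict(adict):
--     rdict = {}
--     for name in adict:
--         key = name.split('_')[0]
--         seq = adict[name]
--         try:
--             rdict[key].append(seq)
--         except:
--             rdict[key] = [seq]
--     return rdict
-- ===== SOURCE B (Python) =====
-- def group_seqDict(adict):
--     pairs = [(name.split('_')[0], adict[name]) for name in adict]
--     return {k: [s for k2, s in pairs if k2 == k] for k, _ in pairs}
-- ===== Notes on version B (the rewrite author's own statement) =====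
-- stated objective: alternative
-- what changed: B first materialises the list of (prefix-key, seq) pairs, then builds the result in one dict comprehension mapping each key to a filter-scan over all pairs, replacing A's incremental append-or-create mutation guarded by try/except.
import Mathlib
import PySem

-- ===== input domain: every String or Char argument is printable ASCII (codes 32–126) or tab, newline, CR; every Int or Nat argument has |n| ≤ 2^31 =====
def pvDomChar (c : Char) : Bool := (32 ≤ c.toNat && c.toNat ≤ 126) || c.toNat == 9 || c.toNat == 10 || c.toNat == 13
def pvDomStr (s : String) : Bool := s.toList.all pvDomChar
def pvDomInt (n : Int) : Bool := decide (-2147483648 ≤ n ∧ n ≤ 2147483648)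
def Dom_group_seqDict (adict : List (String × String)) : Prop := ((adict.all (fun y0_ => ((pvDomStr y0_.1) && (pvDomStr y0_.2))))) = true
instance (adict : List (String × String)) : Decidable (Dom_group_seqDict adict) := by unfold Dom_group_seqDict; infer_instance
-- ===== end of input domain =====

-- B builds the grouping by a pair-list + per-key filter scan instead of A's incremental
-- try/except append; alternative decomposition, same result.


-- ===== PORT A =====
-- name.split('_')[0]; the split result is always nonempty, so the [0] never raises
def pvKey (name : String) : String :=
  (PySem.List.pyGet? ((PySem.Str.split? name "_").getD []) 0).getD ""

-- try: rdict[key].append(seq) / except: rdict[key] = [seq]  ==  rdict[key] = rdict.get(key, []) + [seq]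
def group_seqDict (adict : List (String × String)) : List (String × List String) :=
  (adict.foldl (fun rdict p => rdict.modify (pvKey p.1) [] (· ++ [p.2]))
    (PySem.Dict.empty : PySem.Dict String (List String))).items

-- ===== PORT B =====
def group_seqDict_alt (adict : List (String × String)) : List (String × List String) :=
  let pairs := adict.map (fun p => (pvKey p.1, p.2))
  (pairs.foldl
      (fun d q => d.insert q.1 ((pairs.filter (fun r => r.1 == q.1)).map (·.2)))
      (PySem.Dict.empty : PySem.Dict String (List String))).items

-- ===== PRECONDITION & SPEC =====
-- Pre_ requires distinct names: only such association lists faithfully represent the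
-- Python dict argument (a dict cannot hold duplicate keys), and both ports read each
-- pair's own value where the Pythons do the dict lookup adict[name].
def Pre_group_seqDict (adict : List (String × String)) : Prop :=
  (adict.map Prod.fst).Nodup

instance (adict : List (String × String)) : Decidable (Pre_group_seqDict adict) := by
  unfold Pre_group_seqDict; infer_instance

def pvWitness_group_seqDict : (List (String × String)) :=
  [("a_1", "ACGT"), ("a_2", "TTTT"), ("b_1", "GG")]

def Spec_group_seqDict (adict : List (String × String)) (out : List (String × List String)) : Prop := out = group_seqDict_alt adict
instance (adict : List (String × String)) (out : List (String × List String)) : Decidable (Spec_group_seqDict adict out) := by unfold Spec_group_seqDict; infer_instance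

-- ===== CLAIM (what is proved, stated in full; the proofs are below) =====
def Claim_equal_group_seqDict : Prop := ∀ (adict : List (String × String)), Dom_group_seqDict adict → Pre_group_seqDict adict → Spec_group_seqDict adict (group_seqDict adict)

-- ===== LEMMAS AND PROOFS =====

-- B's fold inserts, at key q.1, a value that depends only on q.1; lookup in the result.
theorem getD_foldl_insert_keyval (V : String → List String)
    (l : List (String × String)) (d : PySem.Dict String (List String)) (c : String) :
    (l.foldl (fun d q => d.insert q.1 (V q.1)) d).getD c []
      = if c ∈ l.map Prod.fst then V c else d.getD c [] := by
  induction l generalizing d with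
  | nil => simp
  | cons q l ih =>
    simp only [List.foldl_cons, ih, List.map_cons, List.mem_cons]
    by_cases hc : c ∈ l.map Prod.fst
    · simp [hc]
    · by_cases he : c = q.1
      · subst he; simp [hc, PySem.Dict.getD_insert_self]
      · simp only [hc, he, if_false, or_false]
        exact PySem.Dict.getD_insert_of_ne d (V q.1) [] he

theorem group_seqDict_spec' (adict : List (String × String)) :
    group_seqDict adict = group_seqDict_alt adict := by
  unfold group_seqDict group_seqDict_alt
  set pairs := adict.map (fun p => (pvKey p.1, p.2)) with hpairs
  have hA :
      adict.foldl (fun rdict p => rdict.modify (pvKey p.1) [] (· ++ [p.2]))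
        (PySem.Dict.empty : PySem.Dict String (List String))
      = pairs.foldl (fun rdict q => rdict.modify q.1 [] (· ++ [q.2])) PySem.Dict.empty := by
    rw [hpairs, List.foldl_map]
  rw [hA]
  set dA := pairs.foldl (fun rdict q => rdict.modify q.1 [] (· ++ [q.2]))
    (PySem.Dict.empty : PySem.Dict String (List String)) with hdA
  set dB := pairs.foldl
      (fun d q => d.insert q.1 ((pairs.filter (fun r => r.1 == q.1)).map (·.2)))
      (PySem.Dict.empty : PySem.Dict String (List String)) with hdB
  -- identical key lists
  have hkA : dA.keys = PySem.Set.update (PySem.Dict.empty (ν := List String)).keys (pairs.map Prod.fst) := by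
    rw [hdA]
    exact PySem.Dict.keys_foldl_modify_key pairs Prod.fst [] (fun _ q => (· ++ [q.2])) _
  have hkB : dB.keys = PySem.Set.update (PySem.Dict.empty (ν := List String)).keys (pairs.map Prod.fst) := by
    rw [hdB]
    exact PySem.Dict.keys_foldl_insert_key pairs Prod.fst
      (fun _ q => (pairs.filter (fun r => r.1 == q.1)).map (·.2)) _
  have hkeys : dA.keys = dB.keys := by rw [hkA, hkB]
  have hndA : dA.keys.Nodup := by
    rw [hdA]
    exact PySem.Dict.nodup_keys_foldl_modify_key pairs Prod.fst [] (fun _ q => (· ++ [q.2])) _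
      (by simp [PySem.Dict.keys_empty])
  have hndB : dB.keys.Nodup := by rw [← hkeys]; exact hndA
  -- identical lookups
  have hget : ∀ c, dA.getD c [] = dB.getD c [] := by
    intro c
    have h1 : dA.getD c [] = (pairs.filter (fun r => r.1 == c)).map (·.2) := by
      rw [hdA]
      simpa using PySem.Dict.getD_foldl_modify_append pairs PySem.Dict.empty c
    have h2 : dB.getD c [] =
        if c ∈ pairs.map Prod.fst then (pairs.filter (fun r => r.1 == c)).map (·.2) else [] := by
      rw [hdB]
      simpa using getD_foldl_insert_keyval
        (fun k => (pairs.filter (fun r => r.1 == k)).map (·.2)) pairs PySem.Dict.empty c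
    rw [h1, h2]
    by_cases hc : c ∈ pairs.map Prod.fst
    · simp [hc]
    · have : pairs.filter (fun r => r.1 == c) = [] := by
        rw [List.filter_eq_nil_iff]
        intro r hr hrc
        exact hc (List.mem_map.mpr ⟨r, hr, by simpa using hrc⟩)
      simp [hc, this]
  -- same keys, same lookups, nodup keys ⇒ same items
  rw [PySem.Dict.items_eq_map_keys dA hndA [], PySem.Dict.items_eq_map_keys dB hndB [], hkeys]
  exact List.map_congr_left (fun k _ => by rw [hget k])

-- ===== VERDICT (by name: the statement is the Claim_ definition above) =====
theorem group_seqDict_spec : Claim_equal_group_seqDict := by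
  intro adict _ _
  unfold Spec_group_seqDict
  exact group_seqDict_spec' adict
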